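-- pv_equiv track=rewrite | github.com/sqoojack/Master-Thesis-CodeGuard | main_code/attack/Adversarial_attack/INSEC/insec/AdversarialTokens.py | is_forbidden_token
-- ===== SOURCE A (Python) =====
-- def is_forbidden_token(token):
--     forbidden_strings = [
--         "\n",
--         "\r",
--         "<|endoftext|>",
--         "<fim_prefix>",
--         "<fim_middle>",
--         "<fim_suffix>",
--         "<fim_pad>",
--         "<filename>",
--         "<gh_stars>",
--         "<issue_start>",
--         "<issue_comment>",
--         "<issue_closed>",
--         "<jupyter_start>",
--         "<jupyter_text>",
--         "<jupyter_code>",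
--         "<jupyter_output>",
--         "<empty_output>",
--         "<commit_before>",
--         "<commit_msg>",
--         "<commit_after>",
--         "<reponame>",
--     ]
--     for s in forbidden_strings:
--         if s in token:
--             return True
--     return False
-- ===== SOURCE B (Python) =====
-- import re
--
-- _FORBIDDEN = [
--     "\n", "\r", "<|endoftext|>", "<fim_prefix>", "<fim_middle>", "<fim_suffix>",
--     "<fim_pad>", "<filename>", "<gh_stars>", "<issue_start>", "<issue_comment>",
--     "<issue_closed>", "<jupyter_start>", "<jupyter_text>", "<jupyter_code>",
--     "<jupyter_output>", "<empty_output>", "<commit_before>", "<commit_msg>",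
--     "<commit_after>", "<reponame>",
-- ]
-- _PATTERN = re.compile("|".join(map(re.escape, _FORBIDDEN)))
--
-- def is_forbidden_token(token):
--     return bool(_PATTERN.search(token))
-- ===== Notes on version B (the rewrite author's own statement) =====
-- stated objective: idiomatic
-- what changed: B precompiles one alternation regex from the escaped forbidden strings and answers with a single search over the token, instead of A's loop of ~21 separate substring scans.
import Mathlib
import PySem

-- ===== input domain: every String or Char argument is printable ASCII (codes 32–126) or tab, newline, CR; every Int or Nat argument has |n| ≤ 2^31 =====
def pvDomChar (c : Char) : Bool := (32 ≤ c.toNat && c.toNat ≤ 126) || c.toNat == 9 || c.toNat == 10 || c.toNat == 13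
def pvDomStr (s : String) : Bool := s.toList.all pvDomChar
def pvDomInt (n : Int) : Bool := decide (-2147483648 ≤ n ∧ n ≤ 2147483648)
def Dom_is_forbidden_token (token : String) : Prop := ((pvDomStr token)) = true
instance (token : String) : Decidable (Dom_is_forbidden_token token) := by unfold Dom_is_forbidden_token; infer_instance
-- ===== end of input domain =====

-- B replaces A's loop of 21 separate substring scans by one precompiled alternation
-- regex searched once over the token (idiomatic; return value only).


-- ===== PORT A =====
def forbidden_strings : List String :=
  ["\n", "\r", "<|endoftext|>", "<fim_prefix>", "<fim_middle>", "<fim_suffix>",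
   "<fim_pad>", "<filename>", "<gh_stars>", "<issue_start>", "<issue_comment>",
   "<issue_closed>", "<jupyter_start>", "<jupyter_text>", "<jupyter_code>",
   "<jupyter_output>", "<empty_output>", "<commit_before>", "<commit_msg>",
   "<commit_after>", "<reponame>"]

-- A's loop: `for s in forbidden_strings: if s in token: return True` then `return False`
def forbiddenLoopA (token : String) : List String → Bool
  | [] => false
  | s :: rest => if PySem.Str.isIn s token then true else forbiddenLoopA token rest

def is_forbidden_token (token : String) : Bool :=
  forbiddenLoopA token forbidden_strings

-- ===== PORT B =====
-- B's compiled regex `re.escape(s1)|…|re.escape(s21)`: a pure alternation of literals,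
-- i.e. the list of alternative character sequences the automaton accepts.
def patAlternatives : List (List Char) :=
  [['\n'], ['\r'], "<|endoftext|>".toList, "<fim_prefix>".toList, "<fim_middle>".toList,
   "<fim_suffix>".toList, "<fim_pad>".toList, "<filename>".toList, "<gh_stars>".toList,
   "<issue_start>".toList, "<issue_comment>".toList, "<issue_closed>".toList,
   "<jupyter_start>".toList, "<jupyter_text>".toList, "<jupyter_code>".toList,
   "<jupyter_output>".toList, "<empty_output>".toList, "<commit_before>".toList,
   "<commit_msg>".toList, "<commit_after>".toList, "<reponame>".toList]

-- `pattern.search(token)`: one left-to-right scan; at each position try the alternatives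
def regexScan : List Char → Bool
  | [] => false
  | c :: rest =>
      if patAlternatives.any (fun p => p.isPrefixOf (c :: rest)) then true
      else regexScan rest

-- `bool(pattern.search(token))`
def is_forbidden_token_alt (token : String) : Bool :=
  regexScan token.toList

-- ===== PRECONDITION & SPEC =====
def Spec_is_forbidden_token (token : String) (out : Bool) : Prop := out = is_forbidden_token_alt token
instance (token : String) (out : Bool) : Decidable (Spec_is_forbidden_token token out) := by unfold Spec_is_forbidden_token; infer_instance

-- ===== CLAIM (what is proved, stated in full; the proofs are below) =====
def Claim_equal_is_forbidden_token : Prop := ∀ (token : String), Dom_is_forbidden_token token → Spec_is_forbidden_token token (is_forbidden_token token)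

-- ===== LEMMAS AND PROOFS =====

theorem loopA_true_iff (token : String) (L : List String) :
    forbiddenLoopA token L = true ↔ ∃ s ∈ L, PySem.Str.isIn s token = true := by
  induction L with
  | nil => simp [forbiddenLoopA]
  | cons s rest ih => simp [forbiddenLoopA, PySem.Str.isIn_eq, ih]

theorem regexScan_true_iff (cs : List Char) :
    regexScan cs = true ↔ ∃ j, ∃ p ∈ patAlternatives, p <+: cs.drop j := by
  induction cs with
  | nil =>
      simp only [regexScan, List.drop_nil]
      constructor
      · intro h; cases h
      · rintro ⟨j, p, hp, hpre⟩
        have : p = [] := List.prefix_nil.mp hpre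
        subst this; revert hp; decide
  | cons c rest ih =>
      simp only [regexScan]
      split_ifs with h
      · simp only [true_iff]
        rcases List.any_eq_true.mp h with ⟨p, hp, hpre⟩
        exact ⟨0, p, hp, by simpa using List.isPrefixOf_iff_prefix.mp hpre⟩
      · rw [ih]
        constructor
        · rintro ⟨j, p, hp, hpre⟩
          exact ⟨j + 1, p, hp, by simpa using hpre⟩
        · rintro ⟨j, p, hp, hpre⟩
          cases j with
          | zero =>
              exfalso; apply h
              exact List.any_eq_true.mpr ⟨p, hp, List.isPrefixOf_iff_prefix.mpr (by simpa using hpre)⟩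
          | succ j => exact ⟨j, p, hp, by simpa using hpre⟩

theorem patAlternatives_eq : patAlternatives = forbidden_strings.map String.toList := by decide

-- ===== VERDICT (by name: the statement is the Claim_ definition above) =====
theorem is_forbidden_token_spec : Claim_equal_is_forbidden_token := by
  intro token _
  unfold Spec_is_forbidden_token
  rw [Bool.eq_iff_iff]
  unfold is_forbidden_token is_forbidden_token_alt
  rw [loopA_true_iff, regexScan_true_iff, patAlternatives_eq]
  constructor
  · rintro ⟨s, hs, hin⟩
    have := PySem.Chars.exists_prefix_drop_iff_isIn (sub := s.toList) (s := token.toList)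
    rw [PySem.Str.isIn_eq] at hin
    rcases this.mpr hin with ⟨j, hj⟩
    exact ⟨j, s.toList, List.mem_map_of_mem hs, hj⟩
  · rintro ⟨j, p, hp, hpre⟩
    rcases List.mem_map.mp hp with ⟨s, hs, rfl⟩
    refine ⟨s, hs, ?_⟩
    rw [PySem.Str.isIn_eq]
    exact (PySem.Chars.exists_prefix_drop_iff_isIn _ _).mp ⟨j, hpre⟩
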